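-- pv_equiv track=rewrite | github.com/abhay-a-nayak2305/ARTFORGE-HACKATHON-ERROR-404-NOT-FOUND | backend/app/agent/tools/graph_builder.py | _distribute_y
-- ===== SOURCE A (Python) =====
-- def _distribute_y(count: int, row_ys: list[int]) -> list[int]:
--     """Spread N nodes across available row Y positions."""
--     if count == 0:
--         return []
--     if count == 1:
--         return [155]  # centre
--     result = []
--     for i in range(count):
--         result.append(row_ys[i % len(row_ys)])
--     return result
-- ===== SOURCE B (Python) =====
-- def _distribute_y(count: int, row_ys: list[int]) -> list[int]:
--     """Spread N nodes across available row Y positions."""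
--     if count <= 0:
--         return []
--     if count == 1:
--         return [155]  # centre
--     q, r = divmod(count, len(row_ys))
--     return row_ys * q + row_ys[:r]
-- ===== Notes on version B (the rewrite author's own statement) =====
-- stated objective: simpler
-- what changed: Replaces the index-by-index loop with a modulo lookup by whole-list tiling: divmod(count, len(row_ys)) gives q full copies plus a prefix of length r, built with list repetition and a slice.
import Mathlib
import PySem

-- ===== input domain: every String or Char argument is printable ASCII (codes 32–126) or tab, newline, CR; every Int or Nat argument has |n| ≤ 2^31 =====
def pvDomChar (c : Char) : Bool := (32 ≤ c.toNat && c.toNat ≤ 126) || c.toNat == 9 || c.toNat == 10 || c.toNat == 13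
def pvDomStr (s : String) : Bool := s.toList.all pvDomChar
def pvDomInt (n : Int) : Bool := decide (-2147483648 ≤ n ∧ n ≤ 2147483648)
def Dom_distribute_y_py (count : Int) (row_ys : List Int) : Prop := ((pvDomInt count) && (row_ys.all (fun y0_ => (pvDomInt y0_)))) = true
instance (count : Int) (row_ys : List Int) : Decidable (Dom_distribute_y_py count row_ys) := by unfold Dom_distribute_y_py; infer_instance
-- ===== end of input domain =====

-- ===== PORT A =====
-- One honest line: B builds the cyclic list by tiling (q full copies + a prefix of length r from divmod) instead of A's per-index modulo loop; objective: simpler.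
def distribute_y_py (count : Int) (row_ys : List Int) : List Int :=
  if count = 0 then []
  else if count = 1 then [155]
  else
    (PySem.List.pyRange 0 count 1).foldl
      (fun result i => result ++ [PySem.List.pyGetD row_ys (PySem.Int.mod i (row_ys.length : Int)) 0]) []

-- ===== PORT B =====
def distribute_y_py_alt (count : Int) (row_ys : List Int) : List Int :=
  if count ≤ 0 then []
  else if count = 1 then [155]
  else
    let q := PySem.Int.floordiv count (row_ys.length : Int)
    let r := PySem.Int.mod count (row_ys.length : Int)
    (List.replicate q.toNat row_ys).flatten ++ PySem.List.slice row_ys none (some r)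

-- ===== PRECONDITION & SPEC =====
-- Pre_ excludes exactly the inputs where Python A raises ZeroDivisionError: count >= 2 with an empty row_ys (i % len(row_ys)).
def Pre_distribute_y_py (count : Int) (row_ys : List Int) : Prop := count < 2 ∨ row_ys ≠ []
instance (count : Int) (row_ys : List Int) : Decidable (Pre_distribute_y_py count row_ys) := by unfold Pre_distribute_y_py; infer_instance
def pvWitness_distribute_y_py : Int × List Int := (5, [100, 155, 210])
def Spec_distribute_y_py (count : Int) (row_ys : List Int) (out : List Int) : Prop := out = distribute_y_py_alt count row_ys
instance (count : Int) (row_ys : List Int) (out : List Int) : Decidable (Spec_distribute_y_py count row_ys out) := by unfold Spec_distribute_y_py; infer_instance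

-- ===== CLAIM (what is proved, stated in full; the proofs are below) =====
def Claim_equal_distribute_y_py : Prop := ∀ (count : Int) (row_ys : List Int), Dom_distribute_y_py count row_ys → Pre_distribute_y_py count row_ys → Spec_distribute_y_py count row_ys (distribute_y_py count row_ys)

-- ===== LEMMAS AND PROOFS =====

-- tiling characterisation of a modulo-indexed range map
theorem tile_lemma (l : List Int) (hn : 0 < l.length) (m : Nat) :
    (List.range m).map (fun k => l.getD (k % l.length) 0)
      = (List.replicate (m / l.length) l).flatten ++ l.take (m % l.length) := by
  induction m with
  | zero => simp
  | succ m ih =>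
    rw [List.range_succ, List.map_append, ih]
    have hml := Nat.mod_lt m hn
    have hstep : l.take (m % l.length) ++ [l.getD (m % l.length) 0]
        = l.take (m % l.length + 1) := by
      rw [List.take_add_one, List.getElem?_eq_getElem hml, Option.toList_some,
        List.getD_eq_getElem l 0 hml]
    by_cases h : m % l.length + 1 = l.length
    · have hd := Nat.div_add_mod m l.length
      have hm1 : m + 1 = l.length * (m / l.length + 1) := by
        rw [Nat.mul_add, Nat.mul_one]; omega
      have hdiv : (m + 1) / l.length = m / l.length + 1 := by
        rw [hm1, Nat.mul_div_cancel_left _ hn]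
      have hmod : (m + 1) % l.length = 0 := by
        rw [hm1, Nat.mul_mod_right]
      simp only [List.map_cons, List.map_nil, List.append_assoc, hstep, h,
        List.take_length, hdiv, hmod, List.take_zero, List.append_nil]
      rw [List.replicate_succ', List.flatten_append]
      simp
    · have hd := Nat.div_add_mod m l.length
      have hdm : (m + 1) / l.length = m / l.length ∧ (m + 1) % l.length = m % l.length + 1 :=
        (Nat.div_mod_unique hn).mpr ⟨by omega, by omega⟩
      simp only [List.map_cons, List.map_nil, List.append_assoc, hstep, hdm.1, hdm.2]

-- ===== VERDICT (by name: the statement is the Claim_ definition above) =====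
theorem distribute_y_py_spec : Claim_equal_distribute_y_py := by
  intro count row_ys hdom hpre
  unfold Spec_distribute_y_py distribute_y_py distribute_y_py_alt
  by_cases h0 : count = 0
  · simp [h0]
  by_cases h1 : count = 1
  · simp [h1]
  by_cases hneg : count ≤ 0
  · have : PySem.List.pyRange 0 count 1 = [] := by
      simp [PySem.List.pyRange]; omega
    simp [h0, h1, hneg, this]
  · -- count ≥ 2, hence row_ys ≠ []
    have hc2 : 2 ≤ count := by omega
    have hne : row_ys ≠ [] := by
      rcases hpre with h | h
      · omega
      · exact h
    have hn : 0 < row_ys.length := List.length_pos_iff.mpr hne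
    simp only [h0, h1, hneg, if_false]
    obtain ⟨m, hm⟩ : ∃ m : Nat, count = (m : Int) := ⟨count.toNat, by omega⟩
    subst hm
    rw [PySem.List.foldl_append_singleton_eq_map, PySem.List.pyRange_zero_natCast,
      List.map_map, List.nil_append]
    have hmap : ((fun i => PySem.List.pyGetD row_ys (PySem.Int.mod i (row_ys.length : Int)) 0)
          ∘ (fun k : Nat => (k : Int)))
        = fun k => row_ys.getD (k % row_ys.length) 0 := by
      funext k
      simp only [Function.comp_apply, PySem.Int.mod_natCast, PySem.List.pyGetD_natCast]
    rw [hmap, tile_lemma row_ys hn m]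
    have hq : (PySem.Int.floordiv (m : Int) (row_ys.length : Int)).toNat
        = m / row_ys.length := by
      rw [PySem.Int.floordiv_natCast]; exact Int.toNat_natCast _
    have hr : PySem.Int.mod (m : Int) (row_ys.length : Int)
        = ((m % row_ys.length : Nat) : Int) := PySem.Int.mod_natCast m row_ys.length
    rw [hq, hr, PySem.List.slice_to_natCast]
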